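-- pv_equiv track=rewrite | github.com/smthemex/ComfyUI_StoryDiffusion | model_loader_utils.py | adjust_indices
-- ===== SOURCE A (Python) =====
-- def adjust_indices(original_indices, deleted_indices):
--     """根据删除的索引列表调整原索引"""
--     # 处理删除列表为空的特殊情况
--     if not deleted_indices:
--         return original_indices.copy()  # 直接返回原索引，无需调整
--
--     deleted_sorted = sorted(deleted_indices)
--     adjusted = []
--     for idx in original_indices:
--         # 计算偏移量：有多少个删除索引 < 当前索引
--         offset = sum(1 for d in deleted_sorted if d < idx)
--         new_idx = idx - offset
--         # 如果原索引未被删除，则保留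
--         if idx not in deleted_sorted:
--             adjusted.append(new_idx)
--         else:
--             adjusted.append(-1)  # 标记为无效
--     return adjusted
-- ===== SOURCE B (Python) =====
-- def adjust_indices(original_indices, deleted_indices):
--     """Adjust indices after deletions: membership via a set, offset via binary search."""
--     if not deleted_indices:
--         return original_indices.copy()
--     ds = sorted(deleted_indices)
--     dset = set(ds)
--     out = []
--     for idx in original_indices:
--         if idx in dset:
--             out.append(-1)
--         else:
--             lo, hi = 0, len(ds)
--             while lo < hi:
--                 mid = (lo + hi) // 2
--                 if ds[mid] < idx:
--                     lo = mid + 1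
--                 else:
--                     hi = mid
--             out.append(idx - lo)
--     return out
-- ===== Notes on version B (the rewrite author's own statement) =====
-- stated objective: faster
-- what changed: Per element, A scans the whole sorted deleted list twice (a linear count of smaller entries and a linear membership test); B builds a set once for membership and finds the offset with a binary search on the sorted list.
import Mathlib
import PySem

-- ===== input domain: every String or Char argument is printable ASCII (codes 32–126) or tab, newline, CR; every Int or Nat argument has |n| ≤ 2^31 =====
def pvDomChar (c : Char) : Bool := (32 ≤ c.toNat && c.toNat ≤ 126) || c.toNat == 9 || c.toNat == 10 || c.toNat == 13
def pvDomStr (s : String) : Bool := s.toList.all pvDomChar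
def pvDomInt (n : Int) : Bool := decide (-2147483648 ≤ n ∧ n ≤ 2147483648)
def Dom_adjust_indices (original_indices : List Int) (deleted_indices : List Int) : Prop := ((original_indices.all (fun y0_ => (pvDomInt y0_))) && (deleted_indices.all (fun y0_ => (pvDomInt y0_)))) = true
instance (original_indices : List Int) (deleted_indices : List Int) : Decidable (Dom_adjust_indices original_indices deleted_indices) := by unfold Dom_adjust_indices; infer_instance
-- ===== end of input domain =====

-- B replaces A's per-element linear scans over the sorted deleted list (offset count and
-- membership test) by a hand-written binary search for the offset and a set for membership:
-- O((N+D) log D) instead of O(N*D); same return value everywhere (both functions are total).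

-- ===== PORT A =====
def adjust_indices (original_indices : List Int) (deleted_indices : List Int) : List Int :=
  if deleted_indices = [] then
    original_indices
  else
    let deleted_sorted := PySem.List.sorted deleted_indices (fun x => x) false
    original_indices.foldl (fun adjusted idx =>
      let offset : Int := deleted_sorted.foldl (fun acc d => if d < idx then acc + 1 else acc) 0
      let new_idx := idx - offset
      if !(deleted_sorted.contains idx) then adjusted ++ [new_idx]
      else adjusted ++ [-1]) []

-- ===== PORT B =====
-- hand-written binary search loop from Source B (while lo < hi: …), ported as recursion on hi - lo
def pvBsearch (ds : List Int) (idx : Int) (lo hi : Nat) : Nat :=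
  if lo < hi then
    let mid := (lo + hi) / 2
    if ds.getD mid 0 < idx then pvBsearch ds idx (mid + 1) hi
    else pvBsearch ds idx lo mid
  else lo
termination_by hi - lo
decreasing_by all_goals omega

def adjust_indices_alt (original_indices : List Int) (deleted_indices : List Int) : List Int :=
  if deleted_indices = [] then
    original_indices
  else
    let ds := PySem.List.sorted deleted_indices (fun x => x) false
    let dset := PySem.Set.ofList ds
    original_indices.foldl (fun out idx =>
      if PySem.Set.contains dset idx then out ++ [-1]
      else out ++ [idx - (pvBsearch ds idx 0 ds.length : Int)]) []

-- ===== PRECONDITION & SPEC =====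
def Spec_adjust_indices (original_indices : List Int) (deleted_indices : List Int) (out : List Int) : Prop := out = adjust_indices_alt original_indices deleted_indices
instance (original_indices : List Int) (deleted_indices : List Int) (out : List Int) : Decidable (Spec_adjust_indices original_indices deleted_indices out) := by unfold Spec_adjust_indices; infer_instance

-- ===== CLAIM (what is proved, stated in full; the proofs are below) =====
def Claim_equal_adjust_indices : Prop := ∀ (original_indices : List Int) (deleted_indices : List Int), Dom_adjust_indices original_indices deleted_indices → Spec_adjust_indices original_indices deleted_indices (adjust_indices original_indices deleted_indices)

-- ===== LEMMAS AND PROOFS =====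

theorem pvGetD_mono (ds : List Int) (hs : ds.Pairwise (· ≤ ·)) (i j : Nat) (hij : i ≤ j)
    (hj : j < ds.length) : ds.getD i 0 ≤ ds.getD j 0 := by
  rcases Nat.lt_or_eq_of_le hij with h | h
  · have hi : i < ds.length := by omega
    have := (List.pairwise_iff_getElem.mp hs) i j hi hj h
    rwa [List.getD_eq_getElem ds 0 hi, List.getD_eq_getElem ds 0 hj]
  · subst h; exact le_refl _

theorem pvBsearch_front_back (ds : List Int) (idx : Int) (hs : ds.Pairwise (· ≤ ·))
    (lo hi : Nat) (hlo : lo ≤ hi) (hhi : hi ≤ ds.length)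
    (hL : ∀ i, i < lo → ds.getD i 0 < idx)
    (hR : ∀ i, hi ≤ i → i < ds.length → ¬ ds.getD i 0 < idx) :
    (pvBsearch ds idx lo hi ≤ ds.length) ∧
    (∀ i, i < pvBsearch ds idx lo hi → ds.getD i 0 < idx) ∧
    (∀ i, pvBsearch ds idx lo hi ≤ i → i < ds.length → ¬ ds.getD i 0 < idx) := by
  have key : ∀ n lo hi, hi - lo = n → lo ≤ hi → hi ≤ ds.length →
      (∀ i, i < lo → ds.getD i 0 < idx) →
      (∀ i, hi ≤ i → i < ds.length → ¬ ds.getD i 0 < idx) →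
      (pvBsearch ds idx lo hi ≤ ds.length) ∧
      (∀ i, i < pvBsearch ds idx lo hi → ds.getD i 0 < idx) ∧
      (∀ i, pvBsearch ds idx lo hi ≤ i → i < ds.length → ¬ ds.getD i 0 < idx) := by
    intro n
    induction n using Nat.strong_induction_on with
    | _ n ih =>
      intro lo hi hn hlo hhi hL hR
      rw [pvBsearch]
      by_cases h : lo < hi
      · simp only [if_pos h]
        by_cases hm : ds.getD ((lo + hi) / 2) 0 < idx
        · simp only [if_pos hm]
          apply ih (hi - ((lo + hi) / 2 + 1)) (by omega) ((lo + hi) / 2 + 1) hi (by omega)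
            (by omega) hhi
          · intro i hi2
            by_cases hcase : i < lo
            · exact hL i hcase
            · have hmono : ds.getD i 0 ≤ ds.getD ((lo + hi) / 2) 0 :=
                pvGetD_mono ds hs i ((lo + hi) / 2) (by omega) (by omega)
              omega
          · exact hR
        · simp only [if_neg hm]
          apply ih ((lo + hi) / 2 - lo) (by omega) lo ((lo + hi) / 2) (by omega)
            (by omega) (by omega) hL
          intro i hi2 hi3
          have hmono : ds.getD ((lo + hi) / 2) 0 ≤ ds.getD i 0 :=
            pvGetD_mono ds hs ((lo + hi) / 2) i hi2 hi3
          omega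
      · simp only [if_neg h]
        have : lo = hi := by omega
        subst this
        exact ⟨hhi, hL, hR⟩
  exact key (hi - lo) lo hi rfl hlo hhi hL hR

theorem countP_eq_of_split (ds : List Int) (p : Int → Bool) (r : Nat) (hr : r ≤ ds.length)
    (h1 : ∀ i, i < r → p (ds.getD i 0))
    (h2 : ∀ i, r ≤ i → i < ds.length → ¬ p (ds.getD i 0)) :
    ds.countP p = r := by
  induction ds generalizing r with
  | nil =>
      have : r = 0 := by simpa using hr
      simp [this]
  | cons x t ihd =>
    cases r with
    | zero =>
      rw [List.countP_eq_zero.mpr]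
      intro a ha
      rcases List.mem_iff_getElem.mp ha with ⟨i, hi, rfl⟩
      have := h2 i (by omega) hi
      rwa [List.getD_eq_getElem _ 0 hi] at this
    | succ r' =>
      have hx : p x = true := by simpa using h1 0 (by omega)
      have ht : t.countP p = r' := by
        apply ihd r' (by simpa using hr)
        · intro i hi; exact h1 (i + 1) (by omega)
        · intro i hi hi2; exact h2 (i + 1) (by omega) (by simpa using hi2)
      simp [hx, ht]

theorem pvBsearch_eq_countP (ds : List Int) (idx : Int) (hs : ds.Pairwise (· ≤ ·)) :
    pvBsearch ds idx 0 ds.length = ds.countP (fun d => decide (d < idx)) := by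
  obtain ⟨h0, h1, h2⟩ := pvBsearch_front_back ds idx hs 0 ds.length (by omega) (le_refl _)
    (by omega) (by intro i hi hi2; omega)
  exact (countP_eq_of_split ds _ _ h0 (fun i hi => by simpa using h1 i hi)
    (fun i hi hi2 => by simpa using h2 i hi hi2)).symm

theorem step_eq (d : List Int) (acc : List Int) (idx : Int) :
    (let offset : Int := (PySem.List.sorted d (fun x => x) false).foldl
        (fun acc2 e => if e < idx then acc2 + 1 else acc2) 0
     if !((PySem.List.sorted d (fun x => x) false).contains idx) then acc ++ [idx - offset]
     else acc ++ [-1]) =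
    (if PySem.Set.contains (PySem.Set.ofList (PySem.List.sorted d (fun x => x) false)) idx then
        acc ++ [-1]
     else acc ++ [idx - (pvBsearch (PySem.List.sorted d (fun x => x) false) idx 0
        (PySem.List.sorted d (fun x => x) false).length : Int)]) := by
  have hs : (PySem.List.sorted d (fun x => x) false).Pairwise (· ≤ ·) := by
    simpa using PySem.List.sorted_pairwise d (fun x => x)
  have hb := pvBsearch_eq_countP (PySem.List.sorted d (fun x => x) false) idx hs
  have hoff := PySem.List.foldl_ite_add_one (fun e => e < idx)
    (PySem.List.sorted d (fun x => x) false) 0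
  rw [PySem.List.length_sorted] at hb
  by_cases hm2 : idx ∈ d
  · simp [hm2]
  · simp [hm2, hoff, hb]

-- ===== VERDICT (by name: the statement is the Claim_ definition above) =====
theorem adjust_indices_spec : Claim_equal_adjust_indices := by
  intro o d _
  unfold Spec_adjust_indices adjust_indices adjust_indices_alt
  by_cases hd : d = []
  · simp [hd]
  · simp only [if_neg hd]
    congr 1
    funext acc idx
    exact step_eq d acc idx
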